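-- pv_equiv track=rewrite | github.com/rktummalapenta/agentic_memory | experiments/exp0_foundation/run_experiment.py | summarize_session_counts
-- ===== SOURCE A (Python) =====
-- from collections import defaultdict
-- from typing import Any
--
-- def summarize_session_counts(
--     sessions: list[dict[str, Any]],
--     field: str,
-- ) -> dict[str, int]:
--     counts: dict[str, int] = defaultdict(int)
--     for session in sessions:
--         counts[str(session[field])] += 1
--     return dict(sorted(counts.items()))
-- ===== SOURCE B (Python) =====
-- def summarize_session_counts(sessions, field):
--     keys = sorted(str(session[field]) for session in sessions)
--     result = {}
--     i, n = 0, len(keys)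
--     while i < n:
--         j = i + 1
--         while j < n and keys[j] == keys[i]:
--             j += 1
--         result[keys[i]] = j - i
--         i = j
--     return result
-- ===== Notes on version B (the rewrite author's own statement) =====
-- stated objective: alternative
-- what changed: B replaces A's hash-counter-then-sort with a global sort of the key strings followed by a single run-length scan over adjacent equal keys (sort-and-group instead of count-and-sort); the ascending runs directly yield A's key-sorted dict.
import Mathlib
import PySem

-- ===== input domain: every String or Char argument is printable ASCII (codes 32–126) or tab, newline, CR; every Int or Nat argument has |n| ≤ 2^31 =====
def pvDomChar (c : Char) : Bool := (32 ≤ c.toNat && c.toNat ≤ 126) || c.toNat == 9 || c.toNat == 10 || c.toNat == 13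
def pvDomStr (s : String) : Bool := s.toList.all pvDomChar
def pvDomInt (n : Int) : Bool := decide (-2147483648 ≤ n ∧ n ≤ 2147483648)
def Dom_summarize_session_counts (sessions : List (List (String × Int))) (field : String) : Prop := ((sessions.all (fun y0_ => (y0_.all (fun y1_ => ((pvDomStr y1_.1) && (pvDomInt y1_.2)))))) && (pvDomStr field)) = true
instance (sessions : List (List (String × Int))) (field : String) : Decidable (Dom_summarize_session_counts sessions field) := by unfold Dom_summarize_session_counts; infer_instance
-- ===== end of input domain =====

-- B replaces A's hash-counter-then-sort with sort-the-key-strings then one run-length scan (alternative decomposition, same asymptotic cost).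

-- shared key helper: str(session[field]) — first-match association-list lookup (the dict lookup);
-- the .getD 0 default is never reached under Pre_ (Python raises KeyError there)
def pvFieldStr (s : List (String × Int)) (field : String) : String :=
  PySem.Int.toStr ((List.lookup field s).getD 0)

-- ===== PORT A =====
def summarize_session_counts (sessions : List (List (String × Int))) (field : String) : List (String × Int) :=
  PySem.List.sorted2
    (sessions.foldl (fun d s => d.modify (pvFieldStr s field) 0 (· + 1)) PySem.Dict.empty).items
    (fun p => p.1) (fun p => p.2) false

-- ===== PORT B =====
-- the run-length scan of Source B's while-loop: one (value, run length) pair per maximal run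
def pvRuns : List String → List (String × Int)
  | [] => []
  | x :: rest =>
      (x, ((rest.takeWhile (fun y => y == x)).length : Int) + 1) ::
        pvRuns (rest.dropWhile (fun y => y == x))
termination_by l => l.length
decreasing_by
  simp only [List.length_cons]
  exact Nat.lt_succ_of_le (List.length_dropWhile_le _ _)

def summarize_session_counts_alt (sessions : List (List (String × Int))) (field : String) : List (String × Int) :=
  pvRuns (PySem.List.sorted (sessions.map (fun s => pvFieldStr s field)) (fun x => x) false)

-- ===== PRECONDITION & SPEC =====
-- Pre_ excludes exactly the inputs where some session lacks the field: Python A raises KeyError there.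
def Pre_summarize_session_counts (sessions : List (List (String × Int))) (field : String) : Prop :=
  ∀ s ∈ sessions, field ∈ s.map Prod.fst
instance (sessions : List (List (String × Int))) (field : String) : Decidable (Pre_summarize_session_counts sessions field) := by unfold Pre_summarize_session_counts; infer_instance

def pvWitness_summarize_session_counts : (List (List (String × Int))) × String := ([[("a", 1)], [("a", 2)]], "a")

def Spec_summarize_session_counts (sessions : List (List (String × Int))) (field : String) (out : List (String × Int)) : Prop := out = summarize_session_counts_alt sessions field
instance (sessions : List (List (String × Int))) (field : String) (out : List (String × Int)) : Decidable (Spec_summarize_session_counts sessions field out) := by unfold Spec_summarize_session_counts; infer_instance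

-- ===== CLAIM (what is proved, stated in full; the proofs are below) =====
def Claim_equal_summarize_session_counts : Prop := ∀ (sessions : List (List (String × Int))) (field : String), Dom_summarize_session_counts sessions field → Pre_summarize_session_counts sessions field → Spec_summarize_session_counts sessions field (summarize_session_counts sessions field)

-- ===== LEMMAS AND PROOFS =====

-- insertBy only looks at comparisons of x against members of acc
theorem pv_insertBy_congr {α : Type} (b1 b2 : α → α → Bool) (x : α) (acc : List α)
    (h : ∀ y ∈ acc, b1 x y = b2 x y) :
    PySem.List.insertBy b1 x acc = PySem.List.insertBy b2 x acc := by
  induction acc with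
  | nil => rfl
  | cons y ys ih =>
      simp only [PySem.List.insertBy]
      rw [h y (by simp)]
      split
      · rfl
      · rw [ih (fun z hz => h z (by simp [hz]))]

-- an insertion-sort fold only compares elements of the source list with each other
theorem pv_foldl_insertBy_congr {α : Type} (b1 b2 : α → α → Bool) (S : List α)
    (h : ∀ x ∈ S, ∀ y ∈ S, b1 x y = b2 x y) :
    ∀ (l acc : List α), (∀ x ∈ l, x ∈ S) → (∀ x ∈ acc, x ∈ S) →
    l.foldl (fun a x => PySem.List.insertBy b1 x a) acc
      = l.foldl (fun a x => PySem.List.insertBy b2 x a) acc := by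
  intro l
  induction l with
  | nil => intro acc _ _; rfl
  | cons x xs ih =>
      intro acc hl hacc
      simp only [List.foldl_cons]
      rw [pv_insertBy_congr b1 b2 x acc (fun y hy => h x (hl x (by simp)) y (hacc y hy))]
      exact ih _ (fun z hz => hl z (by simp [hz]))
        (fun z hz => by
          rcases (PySem.List.mem_insertBy b2 x z acc).1 hz with rfl | hz'
          · exact hl z (by simp)
          · exact hacc z hz')

-- on a list whose first components are pairwise-determining, Python's tuple sort is the key-sort by the first component
theorem pv_sorted2_eq_sorted_fst (xs : List (String × Int))
    (hinj : ∀ a ∈ xs, ∀ b ∈ xs, a.1 = b.1 → a = b) :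
    PySem.List.sorted2 xs (fun p => p.1) (fun p => p.2) false
      = PySem.List.sorted xs (fun p => p.1) false := by
  show xs.foldl (fun a x => PySem.List.insertBy _ x a) []
      = xs.foldl (fun a x => PySem.List.insertBy _ x a) []
  apply pv_foldl_insertBy_congr _ _ xs _ xs [] (fun _ h => h) (by simp)
  intro a ha b hb
  rcases lt_trichotomy a.1 b.1 with hlt | heq | hgt
  · simp [hlt]
  · have : a = b := hinj a ha b hb heq
    subst this
    simp
  · simp [lt_asymm hgt, hgt]

-- all members of a run equal its head; count of the head in the run is its length
theorem pv_mem_run {x y : String} {l : List String}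
    (h : y ∈ l.takeWhile (fun z => z == x)) : y = x := by
  have := List.mem_takeWhile_imp h
  simpa using this

-- every element surviving the dropWhile is strictly greater than the run value
theorem pv_rest_gt {x : String} {rest : List String}
    (hx : ∀ y ∈ rest, x ≤ y) (hp : rest.Pairwise (· ≤ ·)) :
    ∀ y ∈ rest.dropWhile (fun z => z == x), x < y := by
  intro y hy
  cases hd : rest.dropWhile (fun z => z == x) with
  | nil => simp [hd] at hy
  | cons h0 t =>
      have hh0 : (fun z => z == x) h0 = false := by
        have hne : rest.dropWhile (fun z => z == x) ≠ [] := by simp [hd]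
        have := List.head_dropWhile_not (fun z => z == x) hne
        simpa [hd] using this
      have hh0x : h0 ≠ x := by simpa using hh0
      have hh0mem : h0 ∈ rest := by
        have : h0 ∈ rest.dropWhile (fun z => z == x) := by rw [hd]; exact List.mem_cons_self
        exact (List.dropWhile_sublist _).mem this
      have hxh0 : x < h0 := lt_of_le_of_ne (hx h0 hh0mem) (Ne.symm hh0x)
      rw [hd] at hy
      rcases List.mem_cons.1 hy with rfl | hyt
      · exact hxh0
      · have hpd : (rest.dropWhile (fun z => z == x)).Pairwise (· ≤ ·) :=
          List.Pairwise.sublist (List.dropWhile_sublist _) hp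
        rw [hd] at hpd
        exact lt_of_lt_of_le hxh0 ((List.pairwise_cons.1 hpd).1 y hyt)

-- the run-length scan of a weakly increasing list is the sorted distinct values paired with their counts
theorem pv_runs_sorted (l : List String) (hp : l.Pairwise (· ≤ ·)) :
    pvRuns l = (PySem.List.sorted (PySem.Set.ofList l) (fun x => x) false).map
        (fun k => (k, (l.count k : Int))) := by
  induction l using pvRuns.induct with
  | case1 => simp [pvRuns, PySem.List.sorted]
  | case2 x rest ih =>
      have hx : ∀ y ∈ rest, x ≤ y := (List.pairwise_cons.1 hp).1
      have hprest : rest.Pairwise (· ≤ ·) := (List.pairwise_cons.1 hp).2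
      set run := rest.takeWhile (fun z => z == x) with hrun
      set rest' := rest.dropWhile (fun z => z == x) with hrest'
      have hgt : ∀ y ∈ rest', x < y := pv_rest_gt hx hprest
      have hsplit : run ++ rest' = rest := List.takeWhile_append_dropWhile
      have hprest' : rest'.Pairwise (· ≤ ·) := List.Pairwise.sublist (List.dropWhile_sublist _) hprest
      -- count of x
      have hcx : (x :: rest).count x = run.length + 1 := by
        have h1 : run.count x = run.length :=
          List.count_eq_length.2 (fun b hb => by simp [pv_mem_run hb])
        have h2 : rest'.count x = 0 :=
          List.count_eq_zero.2 (fun hmem => lt_irrefl x (hgt x hmem))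
        rw [List.count_cons_self, ← hsplit, List.count_append, h1, h2]
      -- the sorted distinct values of x :: rest are x followed by those of rest'
      have hxnot : x ∉ PySem.Set.ofList rest' := by
        intro hmem
        exact lt_irrefl x (hgt x ((PySem.Set.mem_ofList rest' x).1 hmem))
      have hnd' : (PySem.List.sorted (PySem.Set.ofList rest') (fun x => x) false).Nodup :=
        (PySem.List.sorted_perm _ _ _).symm.nodup (PySem.Set.nodup_ofList rest')
      have hsortedset :
          PySem.List.sorted (PySem.Set.ofList (x :: rest)) (fun x => x) false
            = x :: PySem.List.sorted (PySem.Set.ofList rest') (fun x => x) false := by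
        apply PySem.List.sorted_eq_of_perm_of_pairwise_lt
        · -- permutation
          have p1 : (PySem.List.sorted (PySem.Set.ofList rest') (fun x => x) false).Perm
              (PySem.Set.ofList rest') := PySem.List.sorted_perm _ _ _
          refine List.Perm.trans (List.Perm.cons x p1) ?_
          rw [List.perm_ext_iff_of_nodup
            (List.nodup_cons.2 ⟨hxnot, PySem.Set.nodup_ofList rest'⟩)
            (PySem.Set.nodup_ofList (x :: rest))]
          intro a
          simp only [List.mem_cons, PySem.Set.mem_ofList]
          constructor
          · rintro (rfl | ha)
            · exact Or.inl rfl
            · exact Or.inr ((List.dropWhile_sublist _).mem ha)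
          · rintro (rfl | ha)
            · exact Or.inl rfl
            · rw [← hsplit] at ha
              rcases List.mem_append.1 ha with hr | hr
              · exact Or.inl (pv_mem_run hr)
              · exact Or.inr hr
        · -- strictly increasing
          refine List.pairwise_cons.2 ⟨?_, ?_⟩
          · intro y hy
            exact hgt y ((PySem.Set.mem_ofList rest' y).1
              ((PySem.List.mem_sorted _ _ _ y).1 hy))
          · exact ((PySem.List.sorted_pairwise (PySem.Set.ofList rest') (fun x => x)).and
              hnd').imp (fun h => lt_of_le_of_ne h.1 h.2)
      -- counts agree between x :: rest and rest' for values of rest'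
      have hcnt : ∀ k ∈ rest', (x :: rest).count k = rest'.count k := by
        intro k hk
        have hkx : k ≠ x := fun he => lt_irrefl x (he ▸ hgt k hk)
        have hrun0 : run.count k = 0 :=
          List.count_eq_zero.2 (fun hmem => hkx (pv_mem_run hmem))
        rw [← hsplit]
        simp [List.count_append, hrun0, Ne.symm hkx]
      rw [pvRuns, hsortedset, List.map_cons]
      congr 1
      · simp only [← hrun, hcx]
        push_cast
        ring_nf
      · rw [ih hprest']
        apply List.map_congr_left
        intro k hk
        have hk' : k ∈ rest' := (PySem.Set.mem_ofList rest' k).1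
          ((PySem.List.mem_sorted _ _ _ k).1 hk)
        rw [hcnt k hk']

-- ===== VERDICT (by name: the statement is the Claim_ definition above) =====
theorem summarize_session_counts_spec : Claim_equal_summarize_session_counts := by
  intro sessions field _ _
  unfold Spec_summarize_session_counts summarize_session_counts summarize_session_counts_alt
  set ks := sessions.map (fun s => pvFieldStr s field) with hks
  -- A's counting loop is Counter(keys)
  have hfold : sessions.foldl (fun d s => d.modify (pvFieldStr s field) 0 (· + 1)) PySem.Dict.empty
      = PySem.Dict.counter ks := by
    rw [PySem.Dict.counter_eq_foldl, hks, List.foldl_map]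
  rw [hfold, PySem.Dict.items_counter]
  -- the items have pairwise-determining first components
  have hinj : ∀ a ∈ (PySem.Set.ofList ks).map (fun k => (k, (ks.count k : Int))),
      ∀ b ∈ (PySem.Set.ofList ks).map (fun k => (k, (ks.count k : Int))), a.1 = b.1 → a = b := by
    intro a ha b hb hab
    rcases List.mem_map.1 ha with ⟨k1, _, rfl⟩
    rcases List.mem_map.1 hb with ⟨k2, _, rfl⟩
    simp only at hab
    simp [hab]
  rw [pv_sorted2_eq_sorted_fst _ hinj]
  -- the key-sort of the items is the map over the sorted distinct keys
  have hnds : (PySem.List.sorted (PySem.Set.ofList ks) (fun x => x) false).Nodup :=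
    (PySem.List.sorted_perm _ _ _).symm.nodup (PySem.Set.nodup_ofList ks)
  have hsorted : PySem.List.sorted
        ((PySem.Set.ofList ks).map (fun k => (k, (ks.count k : Int)))) (fun p => p.1) false
      = (PySem.List.sorted (PySem.Set.ofList ks) (fun x => x) false).map
          (fun k => (k, (ks.count k : Int))) := by
    apply PySem.List.sorted_eq_of_perm_of_pairwise_lt
    · exact List.Perm.map _ (PySem.List.sorted_perm _ _ _)
    · refine List.Pairwise.map _ (fun a b h => h) ?_
      exact ((PySem.List.sorted_pairwise (PySem.Set.ofList ks) (fun x => x)).and hnds).imp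
        (fun h => lt_of_le_of_ne h.1 h.2)
  rw [hsorted]
  -- B's run-length scan of the sorted keys computes the same list
  rw [pv_runs_sorted (PySem.List.sorted ks (fun x => x) false)
    (PySem.List.sorted_pairwise ks (fun x => x))]
  -- identify the distinct-value lists and the counts
  have hperm : (PySem.List.sorted ks (fun x => x) false).Perm ks := PySem.List.sorted_perm _ _ _
  have hsetperm : (PySem.Set.ofList (PySem.List.sorted ks (fun x => x) false)).Perm
      (PySem.Set.ofList ks) := by
    rw [List.perm_ext_iff_of_nodup (PySem.Set.nodup_ofList _) (PySem.Set.nodup_ofList _)]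
    intro a
    simp only [PySem.Set.mem_ofList, PySem.List.mem_sorted]
  have hseteq : PySem.List.sorted (PySem.Set.ofList (PySem.List.sorted ks (fun x => x) false))
        (fun x => x) false
      = PySem.List.sorted (PySem.Set.ofList ks) (fun x => x) false := by
    apply PySem.List.sorted_eq_of_perm_of_pairwise_lt
    · exact List.Perm.trans (PySem.List.sorted_perm _ _ _) hsetperm.symm
    · exact ((PySem.List.sorted_pairwise (PySem.Set.ofList ks) (fun x => x)).and hnds).imp
        (fun h => lt_of_le_of_ne h.1 h.2)
  rw [hseteq]
  apply List.map_congr_left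
  intro k _
  rw [hperm.count_eq]
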